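-- pv_equiv track=rewrite | github.com/supercoderhawk/tf-demos | seg.py | estimate_cws
-- ===== SOURCE A (Python) =====
-- def estimate_cws(current_labels, correct_labels):
--   cor_dict = {}
--   curt_dict = {}
--   curt_start = 0
--   cor_start = 0
--   for label_index, (curt_label, cor_label) in enumerate(zip(current_labels, correct_labels)):
--     if cor_label == 0:
--       cor_dict[label_index] = label_index + 1
--     elif cor_label == 1:
--       cor_start = label_index
--     elif cor_label == 3:
--       cor_dict[cor_start] = label_index + 1
--
--     if curt_label == 0:
--       curt_dict[label_index] = label_index + 1
--     elif curt_label == 1: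
--       curt_start = label_index
--     elif curt_label == 3:
--       curt_dict[curt_start] = label_index + 1
--
--   cor_count = 0
--   recall_length = len(curt_dict)
--   prec_length = len(cor_dict)
--   for curt_start in curt_dict.keys():
--     if curt_start in cor_dict and curt_dict[curt_start] == cor_dict[curt_start]:
--       cor_count += 1
--
--   return cor_count, prec_length, recall_length
-- ===== SOURCE B (Python) =====
-- def _spans(labels):
--     # (start, end) word spans: label 0 = single-char word, 1 = word start, 3 = word end
--     spans = []
--     start = 0
--     for i, lab in enumerate(labels):
--         if lab == 0:
--             spans.append((i, i + 1))
--         elif lab == 1: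
--             start = i
--         elif lab == 3:
--             spans.append((start, i + 1))
--     return spans
--
-- def estimate_cws(current_labels, correct_labels):
--     n = min(len(current_labels), len(correct_labels))
--     cor = _spans(correct_labels[:n])
--     curt = _spans(current_labels[:n])
--     # spans are emitted with strictly increasing end positions, so a linear
--     # two-pointer merge counts the spans common to both lists
--     matches = 0
--     i = j = 0
--     while i < len(cor) and j < len(curt):
--         if cor[i][1] < curt[j][1]:
--             i += 1
--         elif curt[j][1] < cor[i][1]:
--             j += 1
--         else:
--             if cor[i][0] == curt[j][0]:
--                 matches += 1
--             i += 1
--             j += 1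
--     return matches, len(cor), len(curt)
-- ===== Notes on version B (the rewrite author's own statement) =====
-- stated objective: alternative
-- what changed: Replaces the fused two-dict pass plus explicit dict-lookup matching loop by per-sequence (start,end) span lists and a linear two-pointer merge over the end-sorted span lists, with no dict or set at all; Pre_ excludes ill-formed label sequences in which two segments share a start index, where A's dict-overwrite (last segment with a start wins) order is accidental and B counts every span.
-- outside the precondition, e.g. on estimate_cws([0, 3], [0, 3]): A returns (1, 1, 1), B returns (2, 2, 2); on estimate_cws([1, 3, 3], [1, 3, 3]): A returns (1, 1, 1), B returns (2, 2, 2)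
import Mathlib
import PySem

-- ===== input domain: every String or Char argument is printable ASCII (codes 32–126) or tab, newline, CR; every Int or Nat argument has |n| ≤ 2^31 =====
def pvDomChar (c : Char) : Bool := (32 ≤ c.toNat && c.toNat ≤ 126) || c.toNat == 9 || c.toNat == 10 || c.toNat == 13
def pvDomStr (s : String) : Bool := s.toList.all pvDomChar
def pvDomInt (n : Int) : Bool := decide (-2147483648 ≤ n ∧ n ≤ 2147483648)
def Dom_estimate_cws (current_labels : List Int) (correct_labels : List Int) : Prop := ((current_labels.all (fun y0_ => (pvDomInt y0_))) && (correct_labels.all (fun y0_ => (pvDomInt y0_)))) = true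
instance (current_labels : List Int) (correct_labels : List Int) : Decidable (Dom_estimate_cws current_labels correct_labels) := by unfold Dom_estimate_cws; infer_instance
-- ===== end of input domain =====

-- B replaces A's fused two-dict pass and explicit dict-lookup matching loop by per-sequence
-- (start,end) span lists and a linear two-pointer merge over the end-sorted lists (no dict/set);
-- objective: alternative (same cost, different data structure).


-- ===== PORT A =====
-- one loop-body step on one (dict, start) pair, given (label_index, label)
def pvDStep (st : PySem.Dict Int Int × Int) (il : Int × Int) : PySem.Dict Int Int × Int :=
  if il.2 = 0 then (st.1.insert il.1 (il.1 + 1), st.2)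
  else if il.2 = 1 then (st.1, il.1)
  else if il.2 = 3 then (st.1.insert st.2 (il.1 + 1), st.2)
  else st

def estimate_cws (current_labels : List Int) (correct_labels : List Int) : Int × Int × Int :=
  -- state: ((cor_dict, cor_start), (curt_dict, curt_start)); e = (label_index, (curt_label, cor_label))
  let st := (PySem.List.enumerate (current_labels.zip correct_labels) 0).foldl
      (fun st e => (pvDStep st.1 (e.1, e.2.2), pvDStep st.2 (e.1, e.2.1)))
      ((PySem.Dict.empty, 0), (PySem.Dict.empty, 0))
  let cor_dict := st.1.1
  let curt_dict := st.2.1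
  let recall_length : Int := curt_dict.size
  let prec_length : Int := cor_dict.size
  let cor_count := curt_dict.keys.foldl
      (fun c k => if cor_dict.contains k && (curt_dict.getD k 0 == cor_dict.getD k 0) then c + 1 else c)
      (0 : Int)
  (cor_count, prec_length, recall_length)

-- ===== PORT B =====
-- Source B's _spans loop body: append (i, i+1) on label 0, start := i on label 1, append (start, i+1) on label 3
def pvSpanStep (st : List (Int × Int) × Int) (il : Int × Int) : List (Int × Int) × Int :=
  if il.2 = 0 then (st.1 ++ [(il.1, il.1 + 1)], st.2)
  else if il.2 = 1 then (st.1, il.1)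
  else if il.2 = 3 then (st.1 ++ [(st.2, il.1 + 1)], st.2)
  else st

def pvSpans (labels : List Int) : List (Int × Int) :=
  ((PySem.List.enumerate labels 0).foldl pvSpanStep ([], 0)).1

-- Source B's two-pointer while loop, as recursion on the two remaining span lists
def pvMerge : List (Int × Int) → List (Int × Int) → Int
  | [], _ => 0
  | _ :: _, [] => 0
  | (s1, e1) :: xs, (s2, e2) :: ys =>
    if e1 < e2 then pvMerge xs ((s2, e2) :: ys)
    else if e2 < e1 then pvMerge ((s1, e1) :: xs) ys
    else (if s1 = s2 then 1 else 0) + pvMerge xs ys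
termination_by xs ys => xs.length + ys.length

def estimate_cws_alt (current_labels : List Int) (correct_labels : List Int) : Int × Int × Int :=
  let n : Int := min (current_labels.length : Int) (correct_labels.length : Int)
  let cor := pvSpans (PySem.List.slice correct_labels none (some n))
  let curt := pvSpans (PySem.List.slice current_labels none (some n))
  (pvMerge cor curt, (cor.length : Int), (curt.length : Int))

-- ===== PRECONDITION & SPEC =====
-- helpers for Pre_: closed-form index conditions on a label list
-- pvEarly3 l: some label 3 occurs with no label 1 before it
def pvEarly3 (l : List Int) : Bool :=
  (List.range l.length).any fun j =>
    (l.getD j 0 == 3) && (List.range j).all fun m => !(l.getD m 0 == 1)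
-- pvSep3 l: any two label-3 positions have a label 1 strictly between them
def pvSep3 (l : List Int) : Bool :=
  (List.range l.length).all fun j =>
    !(l.getD j 0 == 3) || (List.range j).all fun i =>
      !(l.getD i 0 == 3) || (List.range j).any fun k => decide (i < k) && (l.getD k 0 == 1)
def pvWF (l : List Int) : Bool := pvSep3 l && (!pvEarly3 l || !(l.getD 0 0 == 0))

-- Pre_ excludes ill-formed label sequences that yield two segments with the same start index
-- (two 3s with no 1 between, or a 3 before any 1 together with a 0 at position 0), where A's
-- dict-overwrite (last segment with a given start wins) order is accidental; B counts all spans.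
def Pre_estimate_cws (current_labels : List Int) (correct_labels : List Int) : Prop :=
  pvWF (current_labels.take (min current_labels.length correct_labels.length)) = true ∧
  pvWF (correct_labels.take (min current_labels.length correct_labels.length)) = true
instance (current_labels : List Int) (correct_labels : List Int) : Decidable (Pre_estimate_cws current_labels correct_labels) := by
  unfold Pre_estimate_cws; infer_instance

def pvWitness_estimate_cws : List Int × List Int := ([1, 2, 3, 0], [0, 1, 3, 0])

def Spec_estimate_cws (current_labels : List Int) (correct_labels : List Int) (out : Int × Int × Int) : Prop := out = estimate_cws_alt current_labels correct_labels
instance (current_labels : List Int) (correct_labels : List Int) (out : Int × Int × Int) : Decidable (Spec_estimate_cws current_labels correct_labels out) := by unfold Spec_estimate_cws; infer_instance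

-- ===== CLAIM (what is proved, stated in full; the proofs are below) =====
def Claim_equal_estimate_cws : Prop := ∀ (current_labels : List Int) (correct_labels : List Int), Dom_estimate_cws current_labels correct_labels → Pre_estimate_cws current_labels correct_labels → Spec_estimate_cws current_labels correct_labels (estimate_cws current_labels correct_labels)

-- ===== LEMMAS AND PROOFS =====

-- Prop readings of the Bool preconditions
def pvEarly3P (l : List Int) : Prop :=
  ∃ j < l.length, l.getD j 0 = 3 ∧ ∀ m < j, l.getD m 0 ≠ 1
def pvSep3P (l : List Int) : Prop :=
  ∀ j < l.length, l.getD j 0 = 3 → ∀ i < j, l.getD i 0 = 3 → ∃ k < j, i < k ∧ l.getD k 0 = 1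

lemma pvEarly3P_iff (l : List Int) : pvEarly3 l = true ↔ pvEarly3P l := by
  simp [pvEarly3, pvEarly3P, List.any_eq_true, List.all_eq_true, List.mem_range]

lemma pvSep3P_iff (l : List Int) : pvSep3 l = true ↔ pvSep3P l := by
  simp only [pvSep3, pvSep3P, List.all_eq_true, List.any_eq_true, List.mem_range,
    Bool.or_eq_true, Bool.not_eq_eq_eq_not, Bool.not_true, beq_eq_false_iff_ne, ne_eq,
    Bool.and_eq_true, decide_eq_true_eq, beq_iff_eq]
  constructor
  · intro h j hj h3 i hi hi3
    rcases h j hj with h' | h'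
    · exact absurd h3 h'
    · rcases h' i hi with h'' | h''
      · exact absurd hi3 h''
      · obtain ⟨k, hk, hik, hk1⟩ := h''
        exact ⟨k, hk, hik, hk1⟩
  · intro h j hj
    by_cases h3 : l.getD j 0 = 3
    · right; intro i hi
      by_cases hi3 : l.getD i 0 = 3
      · right
        obtain ⟨k, hk, hik, hk1⟩ := h j hj h3 i hi hi3
        exact ⟨k, hk, hik, hk1⟩
      · left; exact hi3
    · left; exact h3

lemma pvWFP_iff (l : List Int) :
    pvWF l = true ↔ pvSep3P l ∧ (pvEarly3P l → l.getD 0 0 ≠ 0) := by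
  simp only [pvWF, Bool.and_eq_true, Bool.or_eq_true, Bool.not_eq_eq_eq_not, Bool.not_true,
    beq_eq_false_iff_ne, ne_eq, pvSep3P_iff]
  constructor
  · rintro ⟨hs, he⟩
    refine ⟨hs, fun hE => ?_⟩
    rcases he with he | he
    · rw [← pvEarly3P_iff] at hE; rw [hE] at he; exact absurd he (by simp)
    · exact he
  · rintro ⟨hs, he⟩
    refine ⟨hs, ?_⟩
    by_cases hE : pvEarly3 l = true
    · exact Or.inr (he ((pvEarly3P_iff l).mp hE))
    · exact Or.inl (by simpa using hE)


-- A's fused loop is the product of two independent (dict, start) folds over (index, label) lists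
lemma pv_fold_split (l : List (Int × (Int × Int))) (a b : PySem.Dict Int Int × Int) :
    l.foldl (fun st e => (pvDStep st.1 (e.1, e.2.2), pvDStep st.2 (e.1, e.2.1))) (a, b)
      = ((l.map (fun e => (e.1, e.2.2))).foldl pvDStep a,
         (l.map (fun e => (e.1, e.2.1))).foldl pvDStep b) := by
  induction l generalizing a b with
  | nil => simp
  | cons e l ih =>
    simp only [List.foldl_cons, List.map_cons]
    exact ih _ _

-- enumerating a zip and projecting = enumerating the truncated component list
lemma pv_enum_zip_snd (xs ys : List Int) (s : Int) :
    (PySem.List.enumerate (xs.zip ys) s).map (fun e => (e.1, e.2.2))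
      = PySem.List.enumerate (ys.take (min xs.length ys.length)) s := by
  induction xs generalizing ys s with
  | nil => simp [PySem.List.enumerate_nil]
  | cons x xs ih =>
    cases ys with
    | nil => simp [PySem.List.enumerate_nil]
    | cons y ys =>
      simp [PySem.List.enumerate_cons, ih, Nat.succ_min_succ]

lemma pv_enum_zip_fst (xs ys : List Int) (s : Int) :
    (PySem.List.enumerate (xs.zip ys) s).map (fun e => (e.1, e.2.1))
      = PySem.List.enumerate (xs.take (min xs.length ys.length)) s := by
  induction xs generalizing ys s with
  | nil => simp [PySem.List.enumerate_nil]
  | cons x xs ih =>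
    cases ys with
    | nil => simp [PySem.List.enumerate_nil]
    | cons y ys =>
      simp [PySem.List.enumerate_cons, ih, Nat.succ_min_succ]

-- the spans accumulator splits off
lemma pv_sfold_acc (l : List (Int × Int)) (ev : List (Int × Int)) (s : Int) :
    l.foldl pvSpanStep (ev, s)
      = (ev ++ (l.foldl pvSpanStep ([], s)).1, (l.foldl pvSpanStep ([], s)).2) := by
  induction l generalizing ev s with
  | nil => simp
  | cons e l ih =>
    simp only [List.foldl_cons]
    have hstep : ∀ ev : List (Int × Int),
        pvSpanStep (ev, s) e = (ev ++ (pvSpanStep (([] : List (Int × Int)), s) e).1,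
          (pvSpanStep (([] : List (Int × Int)), s) e).2) := by
      intro ev; unfold pvSpanStep; split_ifs <;> simp
    rw [hstep ev]
    rcases hp : pvSpanStep (([] : List (Int × Int)), s) e with ⟨w, s'⟩
    simp only [hp]
    rw [ih (ev ++ w) s', ih w s']
    simp

-- the (dict, start) fold is: collect spans, then insert them left to right
lemma pv_dfold_spans (l : List (Int × Int)) (d : PySem.Dict Int Int) (s : Int) :
    l.foldl pvDStep (d, s)
      = ((l.foldl pvSpanStep ([], s)).1.foldl (fun d p => d.insert p.1 p.2) d,
         (l.foldl pvSpanStep ([], s)).2) := by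
  induction l generalizing d s with
  | nil => simp
  | cons e l ih =>
    simp only [List.foldl_cons]
    by_cases h0 : e.2 = 0
    · rw [show pvDStep (d, s) e = (d.insert e.1 (e.1 + 1), s) from by simp [pvDStep, h0],
          show pvSpanStep (([] : List (Int × Int)), s) e = ([(e.1, e.1 + 1)], s) from by
            simp [pvSpanStep, h0]]
      rw [ih, pv_sfold_acc l [(e.1, e.1 + 1)] s]
      simp
    · by_cases h1 : e.2 = 1
      · rw [show pvDStep (d, s) e = (d, e.1) from by simp [pvDStep, h0, h1],
            show pvSpanStep (([] : List (Int × Int)), s) e = ([], e.1) from by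
              simp [pvSpanStep, h0, h1]]
        exact ih d e.1
      · by_cases h3 : e.2 = 3
        · rw [show pvDStep (d, s) e = (d.insert s (e.1 + 1), s) from by
              simp [pvDStep, h0, h1, h3],
              show pvSpanStep (([] : List (Int × Int)), s) e = ([(s, e.1 + 1)], s) from by
                simp [pvSpanStep, h0, h1, h3]]
          rw [ih, pv_sfold_acc l [(s, e.1 + 1)] s]
          simp
        · rw [show pvDStep (d, s) e = (d, s) from by simp [pvDStep, h0, h1, h3],
              show pvSpanStep (([] : List (Int × Int)), s) e = ([], s) from by
                simp [pvSpanStep, h0, h1, h3]]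
          exact ih d s

-- the span list generated from label list l, first index k, current start s
def pvG (l : List Int) (k s : Int) : List (Int × Int) :=
  ((PySem.List.enumerate l k).foldl pvSpanStep ([], s)).1

lemma pvG_nil (k s : Int) : pvG [] k s = [] := rfl

lemma pvG_cons (a : Int) (t : List Int) (k s : Int) :
    pvG (a :: t) k s =
      if a = 0 then (k, k + 1) :: pvG t (k + 1) s
      else if a = 1 then pvG t (k + 1) k
      else if a = 3 then (s, k + 1) :: pvG t (k + 1) s
      else pvG t (k + 1) s := by
  unfold pvG
  rw [PySem.List.enumerate_cons, List.foldl_cons]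
  split_ifs with h0 h1 h3
  · rw [show pvSpanStep ([], s) (k, a) = ([(k, k + 1)], s) from by simp [pvSpanStep, h0]]
    rw [pv_sfold_acc]; simp
  · rw [show pvSpanStep ([], s) (k, a) = ([], k) from by simp [pvSpanStep, h0, h1]]
  · rw [show pvSpanStep ([], s) (k, a) = ([(s, k + 1)], s) from by simp [pvSpanStep, h0, h1, h3]]
    rw [pv_sfold_acc]; simp
  · rw [show pvSpanStep ([], s) (k, a) = ([], s) from by simp [pvSpanStep, h0, h1, h3]]

-- every generated span ends after k
lemma pvG_snd_gt (l : List Int) : ∀ (k s : Int), ∀ p ∈ pvG l k s, k < p.2 := by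
  induction l with
  | nil => intro k s p hp; simp [pvG_nil] at hp
  | cons a t ih =>
    intro k s p hp
    rw [pvG_cons] at hp
    split_ifs at hp with h0 h1 h3
    · rcases List.mem_cons.mp hp with h | h
      · rw [h]; omega
      · have := ih (k + 1) s p h; omega
    · have := ih (k + 1) k p hp; omega
    · rcases List.mem_cons.mp hp with h | h
      · rw [h]; omega
      · have := ih (k + 1) s p h; omega
    · have := ih (k + 1) s p hp; omega

-- span ends are strictly increasing
lemma pvG_pairwise (l : List Int) : ∀ (k s : Int), (pvG l k s).Pairwise (fun p q => p.2 < q.2) := by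
  induction l with
  | nil => intro k s; simp [pvG_nil]
  | cons a t ih =>
    intro k s
    rw [pvG_cons]
    split_ifs with h0 h1 h3
    · exact List.pairwise_cons.mpr ⟨fun q hq => by have := pvG_snd_gt t (k + 1) s q hq; simpa using this, ih _ _⟩
    · exact ih _ _
    · exact List.pairwise_cons.mpr ⟨fun q hq => by have := pvG_snd_gt t (k + 1) s q hq; simpa using this, ih _ _⟩
    · exact ih _ _

lemma pvEarly3P_three (t : List Int) : pvEarly3P ((3 : Int) :: t) :=
  ⟨0, by simp, by simp, by omega⟩

lemma pvEarly3P_cons (a : Int) (t : List Int) (ha : a ≠ 1) (h : pvEarly3P t) : pvEarly3P (a :: t) := by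
  obtain ⟨j, hj, h3, h1⟩ := h
  refine ⟨j + 1, by simpa using hj, by simpa using h3, ?_⟩
  intro m hm
  cases m with
  | zero => simpa using ha
  | succ m => simpa using h1 m (by omega)

lemma pvSep3P_tail (a : Int) (t : List Int) (h : pvSep3P (a :: t)) : pvSep3P t := by
  intro j hj h3 i hi hi3
  obtain ⟨k, hk, hik, hk1⟩ := h (j + 1) (by simpa using hj) (by simpa using h3)
      (i + 1) (by omega) (by simpa using hi3)
  cases k with
  | zero => omega
  | succ k => exact ⟨k, by omega, by omega, by simpa using hk1⟩

-- every generated span starts at ≥ k, or at the inherited s because of a 3 before any 1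
lemma pvG_start_mem (l : List Int) :
    ∀ (k s : Int), ∀ p ∈ pvG l k s, k ≤ p.1 ∨ (p.1 = s ∧ pvEarly3P l) := by
  induction l with
  | nil => intro k s p hp; simp [pvG_nil] at hp
  | cons a t ih =>
    intro k s p hp
    rw [pvG_cons] at hp
    split_ifs at hp with h0 h1 h3
    · rcases List.mem_cons.mp hp with h | h
      · left; rw [h]
      · rcases ih (k + 1) s p h with h' | ⟨hs, he⟩
        · left; omega
        · right; exact ⟨hs, pvEarly3P_cons a t (by omega) he⟩
    · rcases ih (k + 1) k p hp with h' | ⟨hs, he⟩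
      · left; omega
      · left; omega
    · rcases List.mem_cons.mp hp with h | h
      · right; exact ⟨by rw [h], h3 ▸ pvEarly3P_three t⟩
      · rcases ih (k + 1) s p h with h' | ⟨hs, he⟩
        · left; omega
        · right; exact ⟨hs, pvEarly3P_cons a t (by omega) he⟩
    · rcases ih (k + 1) s p hp with h' | ⟨hs, he⟩
      · left; omega
      · right; exact ⟨hs, pvEarly3P_cons a t h1 he⟩

-- under the well-formedness precondition the span starts are pairwise distinct
lemma pvG_starts_nodup (l : List Int) :
    ∀ (k s : Int), s ≤ k → pvSep3P l → (pvEarly3P l → s < k ∨ l.getD 0 0 ≠ 0) →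
      ((pvG l k s).map Prod.fst).Nodup := by
  induction l with
  | nil => intro k s _ _ _; simp [pvG_nil]
  | cons a t ih =>
    intro k s hsk hsep hg
    rw [pvG_cons]
    split_ifs with h0 h1 h3
    · -- a = 0
      simp only [List.map_cons, List.nodup_cons]
      constructor
      · intro hmem
        obtain ⟨p, hp, hpk⟩ := List.mem_map.mp hmem
        rcases pvG_start_mem t (k + 1) s p hp with h | ⟨hps, he⟩
        · omega
        · have : s < k ∨ (a :: t).getD 0 0 ≠ 0 := hg (pvEarly3P_cons a t (by omega) he)
          rcases this with h' | h'
          · omega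
          · exact h' (by simpa using h0)
      · exact ih (k + 1) s (by omega) (pvSep3P_tail a t hsep) (fun _ => Or.inl (by omega))
    · exact ih (k + 1) k (by omega) (pvSep3P_tail a t hsep) (fun _ => Or.inl (by omega))
    · -- a = 3
      simp only [List.map_cons, List.nodup_cons]
      constructor
      · intro hmem
        obtain ⟨p, hp, hpk⟩ := List.mem_map.mp hmem
        rcases pvG_start_mem t (k + 1) s p hp with h | ⟨_, he⟩
        · omega
        · obtain ⟨j, hj, hj3, hj1⟩ := he
          obtain ⟨m, hm, him, hm1⟩ := hsep (j + 1) (by simpa using hj) (by simpa using hj3)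
              0 (by omega) (by simpa using h3)
          cases m with
          | zero => omega
          | succ m => exact hj1 m (by omega) (by simpa using hm1)
      · exact ih (k + 1) s (by omega) (pvSep3P_tail a t hsep) (fun _ => Or.inl (by omega))
    · exact ih (k + 1) s (by omega) (pvSep3P_tail a t hsep) (fun _ => Or.inl (by omega))

-- inserting a list of pairs with distinct fresh keys into the empty dict keeps them as items
lemma pv_items (E : List (Int × Int)) (h : (E.map Prod.fst).Nodup) :
    ((E.foldl (fun d p => d.insert p.1 p.2) PySem.Dict.empty)).items = E := by
  have := PySem.Dict.items_foldl_insert_fresh (l := E) (k := Prod.fst) (v := Prod.snd)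
      (d := PySem.Dict.empty) (fun a _ => by simp [PySem.Dict.contains_empty]) h
  simpa using this

-- the symmetric match predicate of A's counting loop
def pvM (cor curt : PySem.Dict Int Int) (k : Int) : Bool :=
  (curt.get? k == cor.get? k) && (curt.get? k).isSome

-- A's counting loop = countP of pvM over curt's keys
lemma pv_acount (cor curt : PySem.Dict Int Int) :
    curt.keys.foldl
      (fun c k => if cor.contains k && (curt.getD k 0 == cor.getD k 0) then c + 1 else c) (0 : Int)
      = (curt.keys.countP (pvM cor curt) : Int) := by
  rw [PySem.List.foldl_if_add_one, zero_add]
  congr 1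
  refine List.countP_congr fun k hk => ?_
  have hk' : curt.contains k = true := (PySem.Dict.contains_iff_mem_keys curt k).mpr hk
  rw [PySem.Dict.contains_eq_isSome_get?] at hk'
  cases hv : curt.get? k with
  | none => rw [hv] at hk'; simp at hk'
  | some v =>
    have hgd : curt.getD k 0 = v := PySem.Dict.getD_of_get?_eq_some curt 0 hv
    cases hw : cor.get? k with
    | none =>
      have hcc : cor.contains k = false := by rw [PySem.Dict.contains_eq_isSome_get?, hw]; rfl
      simp [pvM, hcc, hv, hw]
    | some w =>
      have hcc : cor.contains k = true := by rw [PySem.Dict.contains_eq_isSome_get?, hw]; rfl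
      have hgw : cor.getD k 0 = w := PySem.Dict.getD_of_get?_eq_some cor 0 hw
      simp [pvM, hcc, hv, hw, hgd, hgw]

-- countP of pvM over curt's keys = number of curt spans that are also cor spans
lemma pv_count_keys (cor curt : PySem.Dict Int Int) (corE curtE : List (Int × Int))
    (hcor : cor.items = corE) (hcurt : curt.items = curtE)
    (hc : (corE.map Prod.fst).Nodup) (hct : (curtE.map Prod.fst).Nodup) :
    curt.keys.countP (pvM cor curt) = curtE.countP (fun p => decide (p ∈ corE)) := by
  have hkc : cor.keys.Nodup := by rw [PySem.Dict.keys, hcor]; exact hc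
  have hkt : curt.keys.Nodup := by rw [PySem.Dict.keys, hcurt]; exact hct
  rw [PySem.Dict.keys, hcurt, List.countP_map]
  refine List.countP_congr fun p hp => ?_
  have hmem : (p.1, p.2) ∈ curt.items := by rw [hcurt]; simpa using hp
  have hv : curt.get? p.1 = some p.2 := PySem.Dict.get?_of_mem_items curt hmem hkt
  have hiff : p ∈ corE ↔ cor.get? p.1 = some p.2 := by
    rw [← hcor]
    constructor
    · intro h; exact PySem.Dict.get?_of_mem_items cor (by simpa using h) hkc
    · intro h; simpa using (PySem.Dict.get?_eq_some_iff_mem_items cor p.1 p.2 hkc).mp h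
  simp only [Function.comp_apply, pvM, hv]
  cases hw : cor.get? p.1 with
  | none =>
    have : ¬ p ∈ corE := by rw [hiff, hw]; simp
    simp [this]
  | some w =>
    by_cases hpw : p.2 = w
    · have : p ∈ corE := by rw [hiff, hw, hpw]
      simp [this, hpw]
    · have : ¬ p ∈ corE := by rw [hiff, hw]; simp; omega
      simp [this, hpw]

-- symmetric counting over two Nodup lists
lemma pv_count_comm (xs ys : List (Int × Int)) (hx : xs.Nodup) (hy : ys.Nodup) :
    xs.countP (fun p => decide (p ∈ ys)) = ys.countP (fun p => decide (p ∈ xs)) := by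
  rw [List.countP_eq_length_filter, List.countP_eq_length_filter]
  refine List.Perm.length_eq ?_
  rw [List.perm_ext_iff_of_nodup (hx.filter _) (hy.filter _)]
  intro p
  simp only [List.mem_filter, decide_eq_true_eq]
  exact and_comm

-- the two-pointer merge counts the common spans, given strictly increasing ends
lemma pv_merge_eq : ∀ (xs ys : List (Int × Int)),
    xs.Pairwise (fun p q => p.2 < q.2) → ys.Pairwise (fun p q => p.2 < q.2) →
    pvMerge xs ys = (xs.countP (fun p => decide (p ∈ ys)) : Int) := by
  intro xs ys
  induction xs, ys using pvMerge.induct with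
  | case1 ys => intro _ _; simp [pvMerge]
  | case2 x xs => intro _ _; simp [pvMerge]
  | case3 s1 e1 xs s2 e2 ys h ih =>
    intro hx hy
    rw [show pvMerge ((s1, e1) :: xs) ((s2, e2) :: ys) = pvMerge xs ((s2, e2) :: ys) from by
      rw [pvMerge]; simp [h]]
    have hnm : ¬ (s1, e1) ∈ (s2, e2) :: ys := by
      intro hmem
      rcases List.mem_cons.mp hmem with h' | h'
      · have : e1 = e2 := congrArg Prod.snd h'
        omega
      · have := (List.pairwise_cons.mp hy).1 _ h'
        simp at this; omega
    rw [List.countP_cons_of_neg (by simpa using hnm)]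
    exact ih (List.pairwise_cons.mp hx).2 hy
  | case4 s1 e1 xs s2 e2 ys h h' ih =>
    intro hx hy
    rw [show pvMerge ((s1, e1) :: xs) ((s2, e2) :: ys) = pvMerge ((s1, e1) :: xs) ys from by
      rw [pvMerge]; simp [h, h']]
    rw [ih hx (List.pairwise_cons.mp hy).2]
    congr 1
    refine List.countP_congr fun p hp => ?_
    have hple : e1 ≤ p.2 := by
      rcases List.mem_cons.mp hp with hh | hh
      · rw [hh]
      · have := (List.pairwise_cons.mp hx).1 _ hh; omega
    have : ¬ p = (s2, e2) := by
      intro hpe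
      have : p.2 = e2 := congrArg Prod.snd hpe
      omega
    simp [List.mem_cons, this]
  | case5 s1 e1 xs s2 e2 ys h h' ih =>
    intro hx hy
    have he : e1 = e2 := by omega
    rw [show pvMerge ((s1, e1) :: xs) ((s2, e2) :: ys)
        = (if s1 = s2 then 1 else 0) + pvMerge xs ys from by rw [pvMerge]; simp [h, h']]
    have htail : xs.countP (fun p => decide (p ∈ (s2, e2) :: ys))
        = xs.countP (fun p => decide (p ∈ ys)) := by
      refine List.countP_congr fun p hp => ?_
      have hgt : e1 < p.2 := (List.pairwise_cons.mp hx).1 _ hp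
      have : ¬ p = (s2, e2) := by
        intro hpe
        have : p.2 = e2 := congrArg Prod.snd hpe
        omega
      simp [List.mem_cons, this]
    rw [ih (List.pairwise_cons.mp hx).2 (List.pairwise_cons.mp hy).2]
    by_cases hs : s1 = s2
    · have hmem : (s1, e1) ∈ (s2, e2) :: ys := by rw [hs, he]; exact List.mem_cons_self
      rw [List.countP_cons_of_pos (by simpa using hmem), htail]
      simp [hs]; omega
    · have hnm : ¬ (s1, e1) ∈ (s2, e2) :: ys := by
        intro hmem
        rcases List.mem_cons.mp hmem with hh | hh
        · exact hs (congrArg Prod.fst hh)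
        · have := (List.pairwise_cons.mp hy).1 _ hh
          simp at this; omega
      rw [List.countP_cons_of_neg (by simpa using hnm), htail]
      simp [hs]

-- slices in B are takes
lemma pv_slice_take (xs : List Int) (n : Nat) :
    PySem.List.slice xs none (some (n : Int)) = xs.take n := by
  rw [PySem.List.slice_to xs (by exact_mod_cast Nat.zero_le n)]
  simp

-- ===== VERDICT (by name: the statement is the Claim_ definition above) =====
theorem estimate_cws_spec : Claim_equal_estimate_cws := by
  intro cur cor _ hpre
  unfold Spec_estimate_cws
  obtain ⟨hwf_cur', hwf_cor'⟩ := hpre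
  have hwf_cur := (pvWFP_iff _).mp hwf_cur'
  have hwf_cor := (pvWFP_iff _).mp hwf_cor'
  simp only [estimate_cws, estimate_cws_alt]
  rw [pv_fold_split, pv_enum_zip_snd, pv_enum_zip_fst]
  have hmin : min (cur.length : Int) (cor.length : Int)
      = ((min cur.length cor.length : Nat) : Int) := (Nat.cast_min cur.length cor.length).symm
  rw [hmin, pv_slice_take, pv_slice_take]
  set n := min cur.length cor.length with hn
  -- identify A's dicts with B's span lists
  have hstream : ∀ l : List Int,
      ((PySem.List.enumerate l 0).foldl pvDStep (PySem.Dict.empty, 0)).1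
        = (pvG l 0 0).foldl (fun d p => d.insert p.1 p.2) PySem.Dict.empty := by
    intro l; rw [pv_dfold_spans]; rfl
  have hspans : ∀ l : List Int, pvSpans l = pvG l 0 0 := fun _ => rfl
  have hnd_cor : ((pvG (cor.take n) 0 0).map Prod.fst).Nodup :=
    pvG_starts_nodup (cor.take n) 0 0 (le_refl 0) hwf_cor.1
      (fun he => Or.inr (hwf_cor.2 he))
  have hnd_cur : ((pvG (cur.take n) 0 0).map Prod.fst).Nodup :=
    pvG_starts_nodup (cur.take n) 0 0 (le_refl 0) hwf_cur.1
      (fun he => Or.inr (hwf_cur.2 he))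
  have hic : ((pvG (cor.take n) 0 0).foldl (fun d p => d.insert p.1 p.2) PySem.Dict.empty).items
      = pvG (cor.take n) 0 0 := pv_items _ hnd_cor
  have hit : ((pvG (cur.take n) 0 0).foldl (fun d p => d.insert p.1 p.2) PySem.Dict.empty).items
      = pvG (cur.take n) 0 0 := pv_items _ hnd_cur
  rw [hstream, hstream, hspans, hspans]
  -- sizes
  have hsize : ∀ (d : PySem.Dict Int Int) (E : List (Int × Int)), d.items = E →
      (d.size : Int) = (E.length : Int) := by
    intro d E h; rw [PySem.Dict.size, h]
  -- counts
  rw [pv_acount,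
      pv_count_keys _ _ (pvG (cor.take n) 0 0) (pvG (cur.take n) 0 0) hic hit hnd_cor hnd_cur,
      pv_count_comm _ _ (hnd_cur.of_map _) (hnd_cor.of_map _),
      ← pv_merge_eq _ _ (pvG_pairwise (cor.take n) 0 0) (pvG_pairwise (cur.take n) 0 0),
      hsize _ _ hic, hsize _ _ hit]
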